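-- pv_equiv track=rewrite | github.com/PatrikBujna/Bc | main.py | urobSkratky
-- ===== SOURCE A (Python) =====
-- def urobSkratky(zostava, frekventovane):
--     meno = ""
--     skratene = []
--     for i in zostava:
--         x = i.split()
--         meno = str(x[0][0:1]) + ". "
--         x = x[1:]
--         for j in x:
--             meno += j + " "
--         skratene.append(meno[:-1])
--
--     for i in frekventovane:
--         count = 0
--         while (count < len(skratene)):
--             x = skratene[count].split()
--             if ''.join(i) == x[len(x) - 1]:
--                 skratene[count] = zostava[count]
--             count += 1
--
--     return skratene
-- ===== SOURCE B (Python) =====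
-- def urobSkratky(zostava, frekventovane):
--     freq = set(frekventovane)
--     out = []
--     for name in zostava:
--         parts = name.split()
--         abbr = " ".join([parts[0][:1] + "."] + parts[1:])
--         last = abbr.split()[-1]
--         out.append(name if last in freq else abbr)
--     return out
-- ===== Notes on version B (the rewrite author's own statement) =====
-- stated objective: faster
-- what changed: B replaces A's second pass (for every frequent surname a full rescan of the abbreviated list with list.index reads and in-place replacement) by a single pass that abbreviates each name once and decides keep-or-replace with one lookup in a set built from frekventovane.
import Mathlib
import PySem

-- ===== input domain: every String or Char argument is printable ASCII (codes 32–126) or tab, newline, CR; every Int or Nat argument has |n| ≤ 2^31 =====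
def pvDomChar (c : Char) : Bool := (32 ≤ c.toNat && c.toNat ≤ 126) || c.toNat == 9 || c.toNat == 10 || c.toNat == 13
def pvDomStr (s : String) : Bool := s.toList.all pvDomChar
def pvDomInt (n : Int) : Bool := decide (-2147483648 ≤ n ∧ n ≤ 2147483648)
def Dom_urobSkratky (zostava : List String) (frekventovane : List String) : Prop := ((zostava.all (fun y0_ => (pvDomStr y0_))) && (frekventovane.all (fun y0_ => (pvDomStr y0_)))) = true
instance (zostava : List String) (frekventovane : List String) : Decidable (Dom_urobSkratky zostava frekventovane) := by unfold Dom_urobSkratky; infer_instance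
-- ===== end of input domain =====

-- B fuses A's two passes into one: a membership set of the frequent surnames is built once, each
-- name is abbreviated once and kept or replaced immediately by one last-word lookup (alternative
-- decomposition; strings are handled on code points per the PySem convention).

-- ===== PORT A =====
-- body of A's first loop: x = i.split(); meno = str(x[0][0:1]) + ". "; for j in x[1:]: meno += j + " "; meno[:-1]
-- (x[0] raises IndexError in Python when the split is empty; Pre_ excludes that, the port defaults with getD)
def pvA_abbrev (i : String) : String :=
  let x := PySem.Str.split₀ i
  let meno := PySem.Chars.slice ((PySem.List.pyGet? x 0).getD "").toList (some 0) (some 1) ++ ". ".toList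
  let x2 := PySem.List.slice x (some 1) none
  let meno2 := x2.foldl (fun m j => m ++ j.toList ++ " ".toList) meno
  String.ofList (PySem.Chars.slice meno2 none (some (-1)))

-- A's inner while loop: count from 0 while count < len(skratene), in-place replacement by list.set
def pvA_while (zostava : List String) (f : String) (s : List String) (count : Nat) : List String :=
  if h : count < s.length then
    pvA_while zostava f
      (if String.ofList (PySem.Chars.join [] (List.map (fun c => [c]) f.toList)) =
            (PySem.List.pyGet? (PySem.Str.split₀ ((PySem.List.pyGet? s (count : Int)).getD ""))
              (((PySem.Str.split₀ ((PySem.List.pyGet? s (count : Int)).getD "")).length : Int) - 1)).getD ""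
        then s.set count ((PySem.List.pyGet? zostava (count : Int)).getD "")
        else s)
      (count + 1)
  else s
termination_by s.length - count
decreasing_by
  split
  · simp only [List.length_set]; omega
  · omega

def urobSkratky (zostava : List String) (frekventovane : List String) : List String :=
  -- meno = "" is dead state (reassigned on every iteration); the first loop appends abbreviations
  let skratene := zostava.foldl (fun acc i => acc ++ [pvA_abbrev i]) ([] : List String)
  frekventovane.foldl (fun sk i => pvA_while zostava i sk 0) skratene

-- ===== PORT B =====
-- Source B's _abbrev: " ".join([parts[0][:1] + "."] + parts[1:])
def pvB_abbrev (name : String) : String :=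
  let parts := PySem.Str.split₀ name
  String.ofList (PySem.Chars.join " ".toList
    ((PySem.Chars.slice ((PySem.List.pyGet? parts 0).getD "").toList none (some 1) ++ ".".toList)
      :: (PySem.List.slice parts (some 1) none).map String.toList))

def urobSkratky_alt (zostava : List String) (frekventovane : List String) : List String :=
  let freq : PySem.Set String := PySem.Set.ofList frekventovane
  zostava.foldl (fun out name =>
    let abbr := pvB_abbrev name
    out ++ [if (PySem.List.pyGet? (PySem.Str.split₀ abbr) (-1)).getD "" ∈ freq then name else abbr]) []

-- ===== PRECONDITION & SPEC =====
-- Pre_ excludes names that are empty or all whitespace: there Python A raises IndexError (x[0] on an empty split).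
def Pre_urobSkratky (zostava : List String) (frekventovane : List String) : Prop :=
  ∀ n ∈ zostava, PySem.Str.split₀ n ≠ []
instance (zostava : List String) (frekventovane : List String) : Decidable (Pre_urobSkratky zostava frekventovane) := by unfold Pre_urobSkratky; infer_instance
def pvWitness_urobSkratky : List String × List String := (["Jan Novak", "Eva K"], ["Novak"])
def Spec_urobSkratky (zostava : List String) (frekventovane : List String) (out : List String) : Prop := out = urobSkratky_alt zostava frekventovane
instance (zostava : List String) (frekventovane : List String) (out : List String) : Decidable (Spec_urobSkratky zostava frekventovane out) := by unfold Spec_urobSkratky; infer_instance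

-- ===== CLAIM (what is proved, stated in full; the proofs are below) =====
def Claim_equal_urobSkratky : Prop := ∀ (zostava : List String) (frekventovane : List String), Dom_urobSkratky zostava frekventovane → Pre_urobSkratky zostava frekventovane → Spec_urobSkratky zostava frekventovane (urobSkratky zostava frekventovane)

-- ===== LEMMAS AND PROOFS =====

-- last word of t, as A reads it: t.split()[len-1] (defaulted; in range whenever the split is nonempty)
def pvLastw (t : String) : String :=
  (PySem.List.pyGet? (PySem.Str.split₀ t) (((PySem.Str.split₀ t).length : Int) - 1)).getD ""

-- an entry after processing the frequent-surname prefix p: replaced iff the abbreviation's last word is in p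
def pvRep (p : List String) (n : String) : String :=
  if pvLastw (pvA_abbrev n) ∈ p then n else pvA_abbrev n

theorem pv_pyGet_last {α : Type} (xs : List α) :
    PySem.List.pyGet? xs ((xs.length : Int) - 1) = PySem.List.pyGet? xs (-1) := by
  simp only [PySem.List.pyGet?, PySem.List.pyIdx?]
  rcases xs with _ | ⟨a, t⟩ <;> simp

theorem pv_join_cons_append (sep p q : List Char) (ws : List (List Char)) :
    PySem.Chars.join sep ((p ++ sep ++ q) :: ws) = p ++ sep ++ PySem.Chars.join sep (q :: ws) := by
  cases ws with
  | nil => simp [PySem.Chars.join_singleton]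
  | cons r ws => simp [PySem.Chars.join_cons_cons, List.append_assoc]

theorem pv_dropLast_join (ws : List (List Char)) : ∀ p : List Char,
    ((p ++ [' ']) ++ ws.flatMap (fun j => j ++ [' '])).dropLast = PySem.Chars.join [' '] (p :: ws) := by
  induction ws with
  | nil => intro p; simp [PySem.Chars.join_singleton]
  | cons q ws ih =>
    intro p
    have h : ((p ++ [' ']) ++ (q :: ws).flatMap (fun j => j ++ [' '])) =
        (((p ++ [' '] ++ q) ++ [' ']) ++ ws.flatMap (fun j => j ++ [' '])) := by
      simp [List.flatMap_cons, List.append_assoc]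
    rw [h, ih (p ++ [' '] ++ q), pv_join_cons_append, PySem.Chars.join_cons_cons]

theorem pv_ab_eq (n : String) : pvB_abbrev n = pvA_abbrev n := by
  cases hx : PySem.Str.split₀ n with
  | nil =>
    simp only [pvA_abbrev, pvB_abbrev, hx]
    exact congrArg String.ofList (by decide)
  | cons w rest =>
    simp only [pvA_abbrev, pvB_abbrev, hx, PySem.Chars.slice_eq_listSlice,
      PySem.List.slice_from_one, List.tail_cons, PySem.List.slice_zero_start]
    have h0 : (PySem.List.pyGet? (w :: rest) (0 : Int)).getD "" = w := by
      simp [PySem.List.pyGet?, PySem.List.pyIdx?]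
    have h1 : PySem.List.slice w.toList none (some (1 : Int)) = w.toList.take 1 := by
      simpa using PySem.List.slice_to_natCast w.toList 1
    rw [h0, h1]
    have h2 : List.foldl (fun m j => m ++ j.toList ++ " ".toList)
        (w.toList.take 1 ++ ". ".toList) rest
        = (w.toList.take 1 ++ ". ".toList) ++ rest.flatMap (fun j => j.toList ++ [' ']) := by
      have hfun : (fun m (j : String) => m ++ j.toList ++ " ".toList)
          = (fun m (j : String) => m ++ (j.toList ++ [' '])) := by
        funext m j; rw [List.append_assoc]; rfl
      rw [hfun, PySem.List.foldl_append_eq_flatMap]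
    rw [h2]
    have h3 : (w.toList.take 1 ++ ". ".toList) = ((w.toList.take 1 ++ ['.']) ++ [' ']) := by
      rw [List.append_assoc]; rfl
    have h4 : rest.flatMap (fun j => j.toList ++ [' '])
        = (rest.map String.toList).flatMap (fun j => j ++ [' ']) := by
      simp [List.flatMap_map]
    rw [PySem.List.slice_to_neg_one, h3, h4, pv_dropLast_join]
    rfl

theorem pv_while_get (zostava : List String) (f : String) (s : List String) (count : Nat) (k : Nat) :
    (pvA_while zostava f s count)[k]? =
      if count ≤ k then
        (s[k]?.map (fun v =>
          if String.ofList (PySem.Chars.join [] (List.map (fun c => [c]) f.toList)) =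
              (PySem.List.pyGet? (PySem.Str.split₀ v) (((PySem.Str.split₀ v).length : Int) - 1)).getD ""
          then (PySem.List.pyGet? zostava (k : Int)).getD "" else v))
      else s[k]? := by
  fun_induction pvA_while with
  | case1 s count h ih =>
    simp only [dite_eq_ite] at ih
    rw [ih]
    rcases lt_trichotomy k count with hk | hk | hk
    · rw [if_neg (show ¬ (count + 1 ≤ k) by omega), if_neg (show ¬ (count ≤ k) by omega)]
      split
      · exact List.getElem?_set_ne (by omega)
      · rfl
    · subst hk
      rw [if_neg (show ¬ (k + 1 ≤ k) by omega), if_pos (le_refl k)]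
      obtain ⟨v, hv⟩ : ∃ v, s[k]? = some v := ⟨_, List.getElem?_eq_some_iff.mpr ⟨h, rfl⟩⟩
      have hvd : (PySem.List.pyGet? s ((k : Nat) : Int)).getD "" = v := by
        rw [PySem.List.pyGet?_natCast, hv]; rfl
      rw [hvd, hv]
      simp only [Option.map_some]
      split
      · exact List.getElem?_set_self h
      · exact hv
    · rw [if_pos (show count + 1 ≤ k by omega), if_pos (show count ≤ k by omega)]
      congr 1
      split
      · exact List.getElem?_set_ne (by omega)
      · rfl
  | case2 s count h =>
    split
    · rcases Nat.lt_or_ge k s.length with hk | hk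
      · omega
      · simp [List.getElem?_eq_none hk]
    · rfl

theorem pv_while_map (zostava : List String) (f : String) (g : String → String) :
    pvA_while zostava f (zostava.map g) 0 =
      zostava.map (fun n =>
        if String.ofList (PySem.Chars.join [] (List.map (fun c => [c]) f.toList)) = pvLastw (g n)
        then n else g n) := by
  apply List.ext_getElem?
  intro k
  rw [pv_while_get, if_pos (Nat.zero_le k)]
  rcases Nat.lt_or_ge k zostava.length with hk | hk
  · obtain ⟨n, hn⟩ : ∃ n, zostava[k]? = some n := ⟨_, List.getElem?_eq_some_iff.mpr ⟨hk, rfl⟩⟩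
    have hz : (PySem.List.pyGet? zostava ((k : Nat) : Int)).getD "" = n := by
      rw [PySem.List.pyGet?_natCast, hn]; rfl
    rw [List.getElem?_map, List.getElem?_map, hn]
    simp only [Option.map_some, pvLastw, hz]
    rfl
  · rw [List.getElem?_map, List.getElem?_map, List.getElem?_eq_none hk]
    rfl

theorem pv_sing_join (f : String) :
    String.ofList (PySem.Chars.join [] (List.map (fun c => [c]) f.toList)) = f := by
  rw [PySem.Chars.join_nil_singletons]; simp

theorem pv_fold_rep (zostava : List String) (fs : List String) : ∀ p : List String,
    fs.foldl (fun sk i => pvA_while zostava i sk 0) (zostava.map (pvRep p))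
      = zostava.map (pvRep (p ++ fs)) := by
  induction fs with
  | nil => intro p; simp
  | cons f fs ih =>
    intro p
    have hstep : pvA_while zostava f (zostava.map (pvRep p)) 0 = zostava.map (pvRep (p ++ [f])) := by
      rw [pv_while_map]
      apply List.map_congr_left
      intro n _
      rw [pv_sing_join]
      by_cases hm : pvLastw (pvA_abbrev n) ∈ p
      · simp [pvRep, hm]
      · simp only [pvRep, if_neg hm]
        by_cases he : f = pvLastw (pvA_abbrev n)
        · simp [he, hm]
        · have hne : pvLastw (pvA_abbrev n) ∉ p ++ [f] := by
            simp only [List.mem_append, List.mem_singleton]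
            rintro (hh | hh)
            · exact hm hh
            · exact he hh.symm
          rw [if_neg he, if_neg hne]
    rw [List.foldl_cons, hstep, ih (p ++ [f])]
    simp

theorem pv_A_char (zostava frekventovane : List String) :
    urobSkratky zostava frekventovane = zostava.map (pvRep frekventovane) := by
  unfold urobSkratky
  rw [PySem.List.foldl_append_singleton_eq_map, List.nil_append]
  have h0 : zostava.map pvA_abbrev = zostava.map (pvRep []) := by
    apply List.map_congr_left; intro n _; simp [pvRep]
  rw [h0, pv_fold_rep zostava frekventovane [], List.nil_append]

theorem pv_B_char (zostava frekventovane : List String) :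
    urobSkratky_alt zostava frekventovane = zostava.map (pvRep frekventovane) := by
  unfold urobSkratky_alt
  rw [PySem.List.foldl_append_singleton_eq_map, List.nil_append]
  apply List.map_congr_left
  intro n _
  rw [pv_ab_eq]
  have hl : (PySem.List.pyGet? (PySem.Str.split₀ (pvA_abbrev n)) (-1)).getD ""
      = pvLastw (pvA_abbrev n) := by
    rw [pvLastw, pv_pyGet_last]
  rw [hl, pvRep]
  by_cases hm : pvLastw (pvA_abbrev n) ∈ frekventovane
  · rw [if_pos ((PySem.Set.mem_ofList frekventovane _).mpr hm), if_pos hm]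
  · rw [if_neg (fun h => hm ((PySem.Set.mem_ofList frekventovane _).mp h)), if_neg hm]

-- ===== VERDICT (by name: the statement is the Claim_ definition above) =====
theorem urobSkratky_spec : Claim_equal_urobSkratky := by
  intro zostava frekventovane _ _
  unfold Spec_urobSkratky
  rw [pv_A_char, pv_B_char]
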